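-- pv_equiv track=rewrite | github.com/0jspr0/step_by_step_programs_involving_strings | step_by_step_uppercase_letters.py | uppercase_letters
-- ===== SOURCE A (Python) =====
-- def uppercase_letters(text):
--     result = ""
--     for i in text:
--         if "a" <= i <= "z":
--             result += chr(ord(i) - 32)
--         else:
--             result += i
--     return result
-- ===== SOURCE B (Python) =====
-- def uppercase_letters(text):
--     for lo, up in zip("abcdefghijklmnopqrstuvwxyz", "ABCDEFGHIJKLMNOPQRSTUVWXYZ"):
--         text = text.replace(lo, up)
--     return text
-- ===== Notes on version B (the rewrite author's own statement) =====
-- stated objective: faster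
-- what changed: Replaces the single interpreted per-character loop with branch and incremental concatenation by 26 staged whole-string str.replace passes, one per lowercase letter; correct because each pass's output (uppercase letters) is never matched by any later pass's pattern.
import Mathlib
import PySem

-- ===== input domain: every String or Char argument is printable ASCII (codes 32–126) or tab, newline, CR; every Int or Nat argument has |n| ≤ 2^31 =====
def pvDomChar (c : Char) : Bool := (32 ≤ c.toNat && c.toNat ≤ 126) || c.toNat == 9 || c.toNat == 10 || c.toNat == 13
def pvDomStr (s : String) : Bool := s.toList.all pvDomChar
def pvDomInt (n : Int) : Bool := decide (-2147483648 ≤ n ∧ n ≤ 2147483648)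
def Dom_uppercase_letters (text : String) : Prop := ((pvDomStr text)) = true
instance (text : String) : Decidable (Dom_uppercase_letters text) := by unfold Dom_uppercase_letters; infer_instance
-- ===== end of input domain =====

-- B replaces A's per-character loop/branch/concatenation by 26 staged whole-string
-- replace passes, one per lowercase letter (alternative decomposition, same result).

-- ===== PORT A =====
-- Literal port of A: loop over characters, branch, append to the result.
def uppercase_letters (text : String) : String :=
  String.ofList (text.toList.foldl
    (fun acc c =>
      if 'a' ≤ c ∧ c ≤ 'z' then acc ++ [Char.ofNat (c.toNat - 32)]
      else acc ++ [c]) [])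

-- ===== PORT B =====
-- zip("abcdefghijklmnopqrstuvwxyz", "ABCDEFGHIJKLMNOPQRSTUVWXYZ")
def pvPairs : List (Char × Char) :=
  "abcdefghijklmnopqrstuvwxyz".toList.zip "ABCDEFGHIJKLMNOPQRSTUVWXYZ".toList

-- for lo, up in pvPairs: text = text.replace(lo, up); return text
def uppercase_letters_alt (text : String) : String :=
  pvPairs.foldl (fun s p => PySem.Str.replace s (String.ofList [p.1]) (String.ofList [p.2])) text

-- ===== PRECONDITION & SPEC =====
def Spec_uppercase_letters (text : String) (out : String) : Prop := out = uppercase_letters_alt text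
instance (text : String) (out : String) : Decidable (Spec_uppercase_letters text out) := by unfold Spec_uppercase_letters; infer_instance

-- ===== CLAIM (what is proved, stated in full; the proofs are below) =====
def Claim_equal_uppercase_letters : Prop := ∀ (text : String), Dom_uppercase_letters text → Spec_uppercase_letters text (uppercase_letters text)

-- ===== LEMMAS AND PROOFS =====

-- replace with a single-char pattern/replacement is a per-character map (go level)
lemma pvGo_single (a b : Char) (l acc : List Char) (fuel : Nat) (h : l.length ≤ fuel) :
    PySem.Chars.replace.go [a] [b] fuel l acc
      = acc.reverse ++ l.map (fun c => if c = a then b else c) := by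
  induction l generalizing fuel acc with
  | nil =>
    cases fuel <;> simp [PySem.Chars.replace.go]
  | cons c t ih =>
    cases fuel with
    | zero => simp at h
    | succ fuel =>
      simp only [List.length_cons, Nat.succ_le_succ_iff] at h
      by_cases hc : c = a
      · have hp : [a].isPrefixOf (c :: t) = true := by simp [List.isPrefixOf, hc]
        simp [PySem.Chars.replace.go, hp, ih _ _ h, hc]
      · have hp : [a].isPrefixOf (c :: t) = false := by simp [List.isPrefixOf, Ne.symm hc]
        simp [PySem.Chars.replace.go, hp, ih _ _ h, hc, Ne.symm hc]

lemma pvReplace_single (a b : Char) (s : List Char) :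
    PySem.Chars.replace s [a] [b] = s.map (fun c => if c = a then b else c) := by
  simpa [PySem.Chars.replace] using pvGo_single a b s [] s.length le_rfl

-- the staged replace passes are a single map by the pointwise fold over the pairs
lemma pvFoldl_replace (ps : List (Char × Char)) (s : String) :
    (ps.foldl (fun s p => PySem.Str.replace s (String.ofList [p.1]) (String.ofList [p.2])) s).toList
      = s.toList.map (fun c => ps.foldl (fun c p => if c = p.1 then p.2 else c) c) := by
  induction ps generalizing s with
  | nil => simp
  | cons p ps ih =>
    simp only [List.foldl_cons]
    rw [ih]
    have hs : (PySem.Str.replace s (String.ofList [p.1]) (String.ofList [p.2])).toList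
        = s.toList.map (fun c => if c = p.1 then p.2 else c) := by
      rw [PySem.Str.toList_replace]; simp [pvReplace_single]
    rw [hs, List.map_map]
    rfl

-- pointwise value of the 26-pass fold on every code point in the domain
set_option maxRecDepth 8192 in
lemma pvPointwise : ∀ n : Nat, n < 127 →
    pvPairs.foldl (fun c p => if c = p.1 then p.2 else c) (Char.ofNat n)
      = (if 97 ≤ n ∧ n ≤ 122 then Char.ofNat (n - 32) else Char.ofNat n) := by decide

-- A's fold with accumulator is the corresponding map
lemma pvFold_eq_map (l : List Char) (acc : List Char) :
    l.foldl (fun acc c =>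
      if 'a' ≤ c ∧ c ≤ 'z' then acc ++ [Char.ofNat (c.toNat - 32)]
      else acc ++ [c]) acc
    = acc ++ l.map (fun c =>
        if 'a' ≤ c ∧ c ≤ 'z' then Char.ofNat (c.toNat - 32) else c) := by
  induction l generalizing acc with
  | nil => simp
  | cons c l ih =>
    simp only [List.foldl_cons, List.map_cons]
    by_cases h : 'a' ≤ c ∧ c ≤ 'z' <;> simp [h, ih]

-- ===== VERDICT (by name: the statement is the Claim_ definition above) =====
theorem uppercase_letters_spec : Claim_equal_uppercase_letters := by
  intro text hdom
  unfold Spec_uppercase_letters uppercase_letters uppercase_letters_alt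
  apply String.ext
  rw [pvFoldl_replace, pvFold_eq_map]
  simp only [List.nil_append, String.toList_ofList]
  apply List.map_congr_left
  intro c hc
  have hd : pvDomChar c = true := by
    have := hdom
    unfold Dom_uppercase_letters pvDomStr at this
    exact List.all_eq_true.mp this c hc
  have hlt : c.toNat < 127 := by
    simp only [pvDomChar, Bool.or_eq_true, Bool.and_eq_true, decide_eq_true_eq,
      beq_iff_eq] at hd
    omega
  have hofNat : Char.ofNat c.toNat = c := Char.ofNat_toNat c
  have := pvPointwise c.toNat hlt
  rw [hofNat] at this
  rw [this]
  have hle : ('a' ≤ c ∧ c ≤ 'z') ↔ (97 ≤ c.toNat ∧ c.toNat ≤ 122) := Iff.rfl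
  by_cases hcase : 97 ≤ c.toNat ∧ c.toNat ≤ 122
  · rw [if_pos (hle.mpr hcase), if_pos hcase]
  · rw [if_neg (fun hh => hcase (hle.mp hh)), if_neg hcase]
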